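-- pv_equiv track=rewrite | github.com/Bolfn/Data-engineering-case | src/weather.py | build_unique_locations
-- ===== SOURCE A (Python) =====
-- def normalize_text(value: str | None) -> str | None:
--     if value is None:
--         return None
--     normalized = value.strip()
--     return normalized or None
--
-- def build_unique_locations(customer_rows: list[dict[str, str]]) -> list[dict[str, str]]:
--     unique_locations: dict[tuple[str, str], dict[str, str]] = {}
--
--     for row in customer_rows:
--         city = normalize_text(row.get("City"))
--         country = normalize_text(row.get("Country"))
--         if not city or not country:
--             continue
--
--         location_key = (city, country)
--         if location_key not in unique_locations:
--             unique_locations[location_key] = {"City": city, "Country": country}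
--
--     return sorted(unique_locations.values(), key=lambda row: (row["Country"], row["City"]))
-- ===== SOURCE B (Python) =====
-- def normalize_text(value):
--     if value is None:
--         return None
--     normalized = value.strip()
--     return normalized or None
--
--
-- def build_unique_locations(customer_rows):
--     # Collect every valid normalized (city, country) pair, sort by
--     # (country, city), then drop adjacent duplicates in one linear pass.
--     pairs = []
--     for row in customer_rows:
--         city = normalize_text(row.get("City"))
--         country = normalize_text(row.get("Country"))
--         if city and country:
--             pairs.append((city, country))
--     pairs.sort(key=lambda p: (p[1], p[0]))
--     result = []
--     prev = None
--     for pair in pairs: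
--         if pair != prev:
--             result.append({"City": pair[0], "Country": pair[1]})
--             prev = pair
--     return result
-- ===== Notes on version B (the rewrite author's own statement) =====
-- stated objective: alternative
-- what changed: Replaces hash-based first-occurrence dedup followed by a keyed sort with collect-all-pairs, sort by (country, city), then a single adjacent-duplicate-dropping pass.
import Mathlib
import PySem

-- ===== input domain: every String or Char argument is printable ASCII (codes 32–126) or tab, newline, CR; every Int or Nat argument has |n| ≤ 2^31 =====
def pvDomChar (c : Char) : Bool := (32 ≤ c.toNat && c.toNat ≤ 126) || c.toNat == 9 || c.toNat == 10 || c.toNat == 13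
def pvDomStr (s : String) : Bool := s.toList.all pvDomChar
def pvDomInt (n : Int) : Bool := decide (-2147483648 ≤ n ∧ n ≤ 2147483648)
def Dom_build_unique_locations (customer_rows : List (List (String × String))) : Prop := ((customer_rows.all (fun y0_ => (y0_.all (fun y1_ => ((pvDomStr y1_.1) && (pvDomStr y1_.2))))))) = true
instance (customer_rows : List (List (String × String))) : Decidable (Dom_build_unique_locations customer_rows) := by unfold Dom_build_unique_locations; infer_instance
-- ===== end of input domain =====

-- B replaces A's hash-based first-occurrence dedup + keyed sort by collect-all, sort by (country, city),
-- then one adjacent-duplicate-dropping pass; same result, an alternative algorithm of the same cost.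


-- ===== PORT A =====
-- shared module helper (both Python versions carry this definition verbatim)
def normalize_text (value : Option String) : Option String :=
  match value with
  | none => none
  | some v =>
      let normalized := PySem.Str.strip v
      if normalized = "" then none else some normalized

-- literal port of A; the sort key 'row["Country"]'/'row["City"]' is ported with getD "" — the keys
-- are always present in the dict's values, so the KeyError branch is unreachable.
def build_unique_locations (customer_rows : List (List (String × String))) : List (List (String × String)) :=
  let unique_locations :=
    customer_rows.foldl
      (fun (d : PySem.Dict (String × String) (List (String × String))) row =>
        let city := normalize_text ((PySem.Dict.mk row).get? "City")
        let country := normalize_text ((PySem.Dict.mk row).get? "Country")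
        match city, country with
        | some c, some k =>
            if d.contains (c, k) then d
            else d.insert (c, k) [("City", c), ("Country", k)]
        | _, _ => d)
      PySem.Dict.empty
  PySem.List.sorted2 unique_locations.values
    (fun r => (PySem.Dict.mk r).getD "Country" "")
    (fun r => (PySem.Dict.mk r).getD "City" "")

-- ===== PORT B =====
-- Source B re-defines the same normalize_text helper; ported under its own name
def normalize_text_alt (value : Option String) : Option String :=
  match value with
  | none => none
  | some v =>
      let normalized := PySem.Str.strip v
      if normalized = "" then none else some normalized

def build_unique_locations_alt (customer_rows : List (List (String × String))) : List (List (String × String)) :=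
  let pairs :=
    customer_rows.foldl
      (fun (acc : List (String × String)) row =>
        let city := normalize_text_alt ((PySem.Dict.mk row).get? "City")
        let country := normalize_text_alt ((PySem.Dict.mk row).get? "Country")
        match city with
        | some c =>
          match country with
          | some k => acc ++ [(c, k)]
          | none => acc
        | none => acc)
      []
  let sortedPairs := PySem.List.sorted2 pairs (fun p => p.2) (fun p => p.1)
  (sortedPairs.foldl
    (fun (st : List (List (String × String)) × Option (String × String)) pair =>
      if st.2 ≠ some pair then (st.1 ++ [[("City", pair.1), ("Country", pair.2)]], some pair)
      else st)
    ([], none)).1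

-- ===== PRECONDITION & SPEC =====
def Spec_build_unique_locations (customer_rows : List (List (String × String))) (out : List (List (String × String))) : Prop := out = build_unique_locations_alt customer_rows
instance (customer_rows : List (List (String × String))) (out : List (List (String × String))) : Decidable (Spec_build_unique_locations customer_rows out) := by unfold Spec_build_unique_locations; infer_instance

-- ===== CLAIM (what is proved, stated in full; the proofs are below) =====
def Claim_equal_build_unique_locations : Prop := ∀ (customer_rows : List (List (String × String))), Dom_build_unique_locations customer_rows → Spec_build_unique_locations customer_rows (build_unique_locations customer_rows)

-- ===== LEMMAS AND PROOFS =====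

-- the (city, country) pair a row contributes (none or one)
def pvRowPairs (row : List (String × String)) : List (String × String) :=
  match normalize_text ((PySem.Dict.mk row).get? "City"),
        normalize_text ((PySem.Dict.mk row).get? "Country") with
  | some c, some k => [(c, k)]
  | _, _ => []

-- the output row built from a pair
def pvMk (p : String × String) : List (String × String) := [("City", p.1), ("Country", p.2)]

-- the (country, city) lexicographic sort key
def pvKey (p : String × String) : Lex (String × String) := toLex (p.2, p.1)

-- pair-level version of A's dict step
def pvPstep (d : PySem.Dict (String × String) (List (String × String))) (p : String × String) :
    PySem.Dict (String × String) (List (String × String)) :=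
  if d.contains p then d else d.insert p (pvMk p)

-- first-occurrence ordered dedup, accumulator form
def pvU (L : List (String × String)) (S : List (String × String)) : List (String × String) :=
  L.foldl (fun s p => if p ∈ s then s else s ++ [p]) S

-- adjacent-dedup after a previous element
def pvGo (prev : String × String) : List (String × String) → List (String × String)
  | [] => []
  | y :: ys => if y = prev then pvGo prev ys else y :: pvGo y ys

-- adjacent-dedup of a whole list
def pvAdj : List (String × String) → List (String × String)
  | [] => []
  | x :: xs => x :: pvGo x xs

theorem pvKey_inj : Function.Injective pvKey := by
  intro a b h
  have h2 : ((b.2, b.1) : String × String) = (a.2, a.1) := toLex.injective h.symm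
  simp only [Prod.mk.injEq] at h2
  exact Prod.ext h2.2.symm h2.1.symm

theorem pvA_fold (rows : List (List (String × String)))
    (d : PySem.Dict (String × String) (List (String × String))) :
    rows.foldl
      (fun (d : PySem.Dict (String × String) (List (String × String))) row =>
        let city := normalize_text ((PySem.Dict.mk row).get? "City")
        let country := normalize_text ((PySem.Dict.mk row).get? "Country")
        match city, country with
        | some c, some k =>
            if d.contains (c, k) then d
            else d.insert (c, k) [("City", c), ("Country", k)]
        | _, _ => d)
      d = (rows.flatMap pvRowPairs).foldl pvPstep d := by
  induction rows generalizing d with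
  | nil => rfl
  | cons row rows ih =>
    simp only [List.foldl_cons, List.flatMap_cons, List.foldl_append]
    rw [ih]
    congr 1
    simp only [pvRowPairs]
    rcases h1 : normalize_text ((PySem.Dict.mk row).get? "City") with _ | c <;>
      rcases h2 : normalize_text ((PySem.Dict.mk row).get? "Country") with _ | k <;>
      simp [pvPstep, pvMk]

theorem pvNorm_alt_eq (v : Option String) : normalize_text_alt v = normalize_text v := rfl

theorem pvB_fold (rows : List (List (String × String))) (acc : List (String × String)) :
    rows.foldl
      (fun (acc : List (String × String)) row =>
        let city := normalize_text_alt ((PySem.Dict.mk row).get? "City")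
        let country := normalize_text_alt ((PySem.Dict.mk row).get? "Country")
        match city with
        | some c =>
          match country with
          | some k => acc ++ [(c, k)]
          | none => acc
        | none => acc)
      acc = acc ++ rows.flatMap pvRowPairs := by
  induction rows generalizing acc with
  | nil => simp
  | cons row rows ih =>
    simp only [List.foldl_cons, List.flatMap_cons]
    rw [ih]
    rcases h1 : normalize_text ((PySem.Dict.mk row).get? "City") with _ | c <;>
      rcases h2 : normalize_text ((PySem.Dict.mk row).get? "Country") with _ | k <;>
      simp [pvRowPairs, pvNorm_alt_eq, h1, h2]

theorem pvU_nodup (L S : List (String × String)) (h : S.Nodup) : (pvU L S).Nodup := by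
  induction L generalizing S with
  | nil => exact h
  | cons p L ih =>
    simp only [pvU, List.foldl_cons]
    by_cases hp : p ∈ S
    · simp only [hp, if_pos]
      exact ih S h
    · simp only [hp, if_neg, not_false_iff]
      refine ih (S ++ [p]) ?_
      simp only [List.nodup_append, List.nodup_singleton, h, true_and]
      intro a ha b hb
      rintro rfl
      simp only [List.mem_singleton] at hb
      exact hp (hb ▸ ha)

theorem pvU_mem (L S : List (String × String)) (x : String × String) :
    x ∈ pvU L S ↔ x ∈ S ∨ x ∈ L := by
  induction L generalizing S with
  | nil => simp [pvU]
  | cons p L ih =>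
    simp only [pvU, List.foldl_cons] at *
    by_cases hp : p ∈ S
    · rw [if_pos hp, ih]
      constructor
      · rintro (h | h)
        · exact Or.inl h
        · exact Or.inr (List.mem_cons_of_mem _ h)
      · rintro (h | h)
        · exact Or.inl h
        · rcases List.mem_cons.mp h with rfl | h
          · exact Or.inl hp
          · exact Or.inr h
    · rw [if_neg hp, ih]
      simp only [List.mem_append, List.mem_cons]
      tauto

theorem pvDict_items (L S : List (String × String)) (h : S.Nodup) :
    (L.foldl pvPstep (PySem.Dict.mk (S.map (fun p => (p, pvMk p))))).items
      = (pvU L S).map (fun p => (p, pvMk p)) := by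
  induction L generalizing S with
  | nil => rfl
  | cons p L ih =>
    simp only [List.foldl_cons, pvU]
    have hkeys : (PySem.Dict.mk (S.map (fun p => (p, pvMk p)))).keys = S := by
      simp [PySem.Dict.keys_mk, Function.comp_def]
    have hcont : (PySem.Dict.mk (S.map (fun p => (p, pvMk p)))).contains p = decide (p ∈ S) := by
      rw [PySem.Dict.contains_eq_decide_mem_keys, hkeys]
    by_cases hp : p ∈ S
    · rw [show pvPstep (PySem.Dict.mk (S.map (fun p => (p, pvMk p)))) p
            = PySem.Dict.mk (S.map (fun p => (p, pvMk p))) by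
          simp [pvPstep, hcont, hp]]
      rw [if_pos hp]
      exact ih S h
    · rw [show pvPstep (PySem.Dict.mk (S.map (fun p => (p, pvMk p)))) p
            = PySem.Dict.mk ((S ++ [p]).map (fun p => (p, pvMk p))) by
          simp only [pvPstep, hcont, hp, decide_false, if_neg, Bool.false_eq_true,
            not_false_eq_true]
          apply PySem.Dict.ext
          rw [PySem.Dict.items_insert_of_not_contains _ _ (by rw [hcont]; simp [hp])]
          simp]
      rw [if_neg hp]
      refine ih (S ++ [p]) ?_
      simp only [List.nodup_append, List.nodup_singleton, h, true_and]
      intro a ha b hb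
      rintro rfl
      simp only [List.mem_singleton] at hb
      exact hp (hb ▸ ha)

theorem pvK1_mk (p : String × String) : (PySem.Dict.mk (pvMk p)).getD "Country" "" = p.2 := by
  simp [pvMk, PySem.Dict.getD_eq_get?_getD, PySem.Dict.get?_mk_cons]

theorem pvK2_mk (p : String × String) : (PySem.Dict.mk (pvMk p)).getD "City" "" = p.1 := by
  simp [pvMk, PySem.Dict.getD_eq_get?_getD, PySem.Dict.get?_mk_cons]

-- the two Bool comparisons agree: sorted2 with keys (snd, fst) is sorted with the lex key
theorem pvBefore_eq (a b : String × String) :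
    (decide (a.2 < b.2) || (!decide (b.2 < a.2) && decide (a.1 < b.1))) = decide (pvKey a < pvKey b) := by
  have hlt : pvKey a < pvKey b ↔ (a.2 < b.2 ∨ (a.2 = b.2 ∧ a.1 < b.1)) := by
    simpa using (Prod.Lex.lt_iff (α := String) (β := String))
      |>.trans Iff.rfl
  rcases lt_trichotomy a.2 b.2 with h | h | h
  · simp [hlt, h, asymm h]
  · simp [hlt, h]
  · simp [hlt, h, asymm h, ne_of_gt h]

theorem pvSorted2_eq (L : List (String × String)) :
    PySem.List.sorted2 L (fun p => p.2) (fun p => p.1) = PySem.List.sorted L pvKey := by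
  simp only [PySem.List.sorted2, PySem.List.sorted]
  congr 1
  funext acc x
  congr 1
  funext a b
  exact pvBefore_eq a b

theorem pvInsertBy_map (b : (String × String) → (String × String) → Bool)
    (b' : List (String × String) → List (String × String) → Bool)
    (h : ∀ a c, b' (pvMk a) (pvMk c) = b a c) (x : String × String) (l : List (String × String)) :
    PySem.List.insertBy b' (pvMk x) (l.map pvMk) = (PySem.List.insertBy b x l).map pvMk := by
  induction l with
  | nil => rfl
  | cons y ys ih =>
    simp only [List.map_cons, PySem.List.insertBy, h]
    by_cases hb : b x y
    · simp [hb]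
    · simp [hb, ih]

theorem pvSorted2_map (M : List (String × String)) :
    PySem.List.sorted2 (M.map pvMk)
        (fun r => (PySem.Dict.mk r).getD "Country" "")
        (fun r => (PySem.Dict.mk r).getD "City" "")
      = (PySem.List.sorted M pvKey).map pvMk := by
  have hb : ∀ a c : String × String,
      ((fun r s : List (String × String) =>
        (decide ((PySem.Dict.mk r).getD "Country" "" < (PySem.Dict.mk s).getD "Country" "")
          || (!decide ((PySem.Dict.mk s).getD "Country" "" < (PySem.Dict.mk r).getD "Country" "")
              && decide ((PySem.Dict.mk r).getD "City" "" < (PySem.Dict.mk s).getD "City" ""))))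
        (pvMk a) (pvMk c))
      = (fun a c : String × String => decide (pvKey a < pvKey c)) a c := by
    intro a c
    simp only [pvK1_mk, pvK2_mk]
    exact pvBefore_eq a c
  simp only [PySem.List.sorted2, PySem.List.sorted]
  have main : ∀ (M : List (String × String)) (acc : List (String × String)),
      (M.map pvMk).foldl
        (fun acc r => PySem.List.insertBy
          (fun r s : List (String × String) =>
            (decide ((PySem.Dict.mk r).getD "Country" "" < (PySem.Dict.mk s).getD "Country" "")
              || (!decide ((PySem.Dict.mk s).getD "Country" "" < (PySem.Dict.mk r).getD "Country" "")
                  && decide ((PySem.Dict.mk r).getD "City" "" < (PySem.Dict.mk s).getD "City" "")))) r acc)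
        (acc.map pvMk)
      = (M.foldl (fun acc x => PySem.List.insertBy
          (fun a c : String × String => decide (pvKey a < pvKey c)) x acc) acc).map pvMk := by
    intro M
    induction M with
    | nil => intro acc; rfl
    | cons x xs ih =>
      intro acc
      simp only [List.map_cons, List.foldl_cons]
      rw [pvInsertBy_map (fun a c : String × String => decide (pvKey a < pvKey c)) _ hb x acc, ih]
  exact main M []

theorem pvBfold_some (l : List (String × String)) (acc : List (List (String × String)))
    (prev : String × String) :
    (l.foldl
      (fun (st : List (List (String × String)) × Option (String × String)) pair =>
        if st.2 ≠ some pair then (st.1 ++ [[("City", pair.1), ("Country", pair.2)]], some pair)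
        else st)
      (acc, some prev)).1 = acc ++ (pvGo prev l).map pvMk := by
  induction l generalizing acc prev with
  | nil => simp [pvGo]
  | cons y ys ih =>
    simp only [List.foldl_cons, pvGo]
    by_cases hy : y = prev
    · subst hy
      simp only [ne_eq, not_true_eq_false, reduceIte]
      rw [ih]
    · rw [if_neg hy]
      simp only [ne_eq, Option.some.injEq]
      rw [if_pos (by exact fun hc => hy hc.symm)]
      rw [ih (acc ++ [[("City", y.1), ("Country", y.2)]]) y]
      simp [pvMk]

theorem pvBfold (l : List (String × String)) :
    (l.foldl
      (fun (st : List (List (String × String)) × Option (String × String)) pair =>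
        if st.2 ≠ some pair then (st.1 ++ [[("City", pair.1), ("Country", pair.2)]], some pair)
        else st)
      ([], none)).1 = (pvAdj l).map pvMk := by
  cases l with
  | nil => rfl
  | cons x xs =>
    simp only [List.foldl_cons, pvAdj]
    rw [show (if (none : Option (String × String)) ≠ some x
          then (([] : List (List (String × String))) ++ [[("City", x.1), ("Country", x.2)]], some x)
          else ([], none)) = ([[("City", x.1), ("Country", x.2)]], some x) by simp]
    rw [pvBfold_some]
    simp [pvMk]

theorem pvGo_mem (s : List (String × String)) (prev : String × String)
    (hs : s.Pairwise (fun a b => pvKey a ≤ pvKey b)) (hp : ∀ y ∈ s, pvKey prev ≤ pvKey y)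
    (x : String × String) : x ∈ pvGo prev s ↔ x ∈ s ∧ x ≠ prev := by
  induction s generalizing prev with
  | nil => simp [pvGo]
  | cons y ys ih =>
    rw [List.pairwise_cons] at hs
    have hpy : pvKey prev ≤ pvKey y := hp y (List.mem_cons_self)
    have hp' : ∀ z ∈ ys, pvKey y ≤ pvKey z := hs.1
    by_cases hy : y = prev
    · subst hy
      simp only [pvGo, reduceIte]
      rw [ih y hs.2 hp']
      constructor
      · rintro ⟨hx, hxy⟩
        exact ⟨List.mem_cons_of_mem _ hx, hxy⟩
      · rintro ⟨hx, hxy⟩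
        rcases List.mem_cons.mp hx with rfl | hx
        · exact absurd rfl hxy
        · exact ⟨hx, hxy⟩
    · simp only [pvGo, hy, reduceIte]
      rw [List.mem_cons, ih y hs.2 hp']
      constructor
      · rintro (rfl | ⟨hx, hxy⟩)
        · exact ⟨List.mem_cons_self, hy⟩
        · refine ⟨List.mem_cons_of_mem _ hx, ?_⟩
          rintro rfl
          exact hy (pvKey_inj (le_antisymm (hp' x hx) hpy))
      · rintro ⟨hx, hxp⟩
        rcases List.mem_cons.mp hx with rfl | hx
        · exact Or.inl rfl
        · by_cases hxy : x = y
          · exact Or.inl hxy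
          · exact Or.inr ⟨hx, hxy⟩

theorem pvGo_chain (s : List (String × String)) (prev : String × String)
    (hs : s.Pairwise (fun a b => pvKey a ≤ pvKey b)) (hp : ∀ y ∈ s, pvKey prev ≤ pvKey y) :
    (prev :: pvGo prev s).Pairwise (fun a b => pvKey a < pvKey b) := by
  induction s generalizing prev with
  | nil => simp [pvGo]
  | cons y ys ih =>
    rw [List.pairwise_cons] at hs
    have hpy : pvKey prev ≤ pvKey y := hp y (List.mem_cons_self)
    have hp' : ∀ z ∈ ys, pvKey y ≤ pvKey z := hs.1
    by_cases hy : y = prev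
    · subst hy
      simp only [pvGo, reduceIte]
      exact ih y hs.2 hp'
    · simp only [pvGo, hy, reduceIte]
      have hchain := ih y hs.2 hp'
      have hlt : pvKey prev < pvKey y :=
        lt_of_le_of_ne hpy (fun he => hy (pvKey_inj he.symm))
      rw [List.pairwise_cons]
      refine ⟨?_, hchain⟩
      intro z hz
      rcases List.mem_cons.mp hz with rfl | hz
      · exact hlt
      · exact lt_trans hlt ((List.pairwise_cons.mp hchain).1 z hz)

theorem pvAdj_mem (s : List (String × String))
    (hs : s.Pairwise (fun a b => pvKey a ≤ pvKey b)) (x : String × String) :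
    x ∈ pvAdj s ↔ x ∈ s := by
  cases s with
  | nil => simp [pvAdj]
  | cons y ys =>
    rw [List.pairwise_cons] at hs
    simp only [pvAdj, List.mem_cons]
    rw [pvGo_mem ys y hs.2 hs.1 x]
    by_cases hxy : x = y <;> simp [hxy]

theorem pvAdj_pairwise (s : List (String × String))
    (hs : s.Pairwise (fun a b => pvKey a ≤ pvKey b)) :
    (pvAdj s).Pairwise (fun a b => pvKey a < pvKey b) := by
  cases s with
  | nil => simp [pvAdj]
  | cons y ys =>
    rw [List.pairwise_cons] at hs
    exact pvGo_chain ys y hs.2 hs.1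

theorem pvAdj_nodup (s : List (String × String))
    (hs : s.Pairwise (fun a b => pvKey a ≤ pvKey b)) : (pvAdj s).Nodup := by
  exact (pvAdj_pairwise s hs).imp (fun h => by intro e; subst e; exact lt_irrefl _ h)

theorem pvSorted_dedup (L : List (String × String)) :
    PySem.List.sorted (pvU L []) pvKey = pvAdj (PySem.List.sorted L pvKey) := by
  have hsp : (PySem.List.sorted L pvKey).Pairwise (fun a b => pvKey a ≤ pvKey b) :=
    PySem.List.sorted_pairwise L pvKey
  apply PySem.List.sorted_eq_of_perm_of_pairwise_lt
  · rw [List.perm_ext_iff_of_nodup (pvAdj_nodup _ hsp) (pvU_nodup L [] List.nodup_nil)]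
    intro a
    rw [pvAdj_mem _ hsp a, PySem.List.mem_sorted, pvU_mem]
    simp
  · exact pvAdj_pairwise _ hsp


-- ===== VERDICT (by name: the statement is the Claim_ definition above) =====
theorem build_unique_locations_spec : Claim_equal_build_unique_locations := by
  intro rows _dom
  unfold Spec_build_unique_locations build_unique_locations build_unique_locations_alt
  simp only []
  rw [pvA_fold, pvB_fold]
  have hd := pvDict_items (rows.flatMap pvRowPairs) [] List.nodup_nil
  simp only [List.map_nil] at hd
  have hvals : (List.foldl pvPstep (PySem.Dict.mk [])
      (rows.flatMap pvRowPairs)).values = (pvU (rows.flatMap pvRowPairs) []).map pvMk := by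
    show (List.foldl pvPstep (PySem.Dict.mk []) (rows.flatMap pvRowPairs)).items.map (·.2)
        = (pvU (rows.flatMap pvRowPairs) []).map pvMk
    rw [hd, List.map_map]
    rfl
  rw [show (PySem.Dict.empty : PySem.Dict (String × String) (List (String × String)))
      = PySem.Dict.mk [] from rfl]
  rw [hvals, pvSorted2_map, pvSorted2_eq, pvSorted_dedup, pvBfold]
  simp
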